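-- pv_equiv track=rewrite | github.com/qifanyyy/JupyterNotebook | new_algs/Sequence algorithms/Phonetic+algorithms/div_sil.py | pre_DIV
-- ===== SOURCE A (Python) =====
-- def pre_DIV(palabra_in, patron_in):
--
--
-- 	dividida = ""
-- 	indice = -1
--
-- 	#Recorrer el patron silabico caracter por caracter
-- 	for car in patron_in:
--
-- 		indice = indice + 1
--
-- 		if car != ".":
-- 			dividida = dividida + palabra_in[indice]
--
-- 		else:
-- 			dividida = dividida + "."
-- 			indice = indice - 1
-- 		#ENDIF
--
--
-- 	#ENDFOR
--
-- 	return dividida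
-- ===== SOURCE B (Python) =====
-- def pre_DIV(palabra_in, patron_in):
--     chunks = []
--     pos = 0
--     for seg in patron_in.split("."):
--         chunks.append(palabra_in[pos:pos + len(seg)])
--         pos += len(seg)
--     return ".".join(chunks)
-- ===== Notes on version B (the rewrite author's own statement) =====
-- stated objective: faster
-- what changed: B splits the pattern at the dots, refills each segment with a slice of the word taken at a running offset, and rejoins with '.', instead of A's single char-by-char pass that maintains a word index and grows the result by repeated string concatenation.
import Mathlib
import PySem

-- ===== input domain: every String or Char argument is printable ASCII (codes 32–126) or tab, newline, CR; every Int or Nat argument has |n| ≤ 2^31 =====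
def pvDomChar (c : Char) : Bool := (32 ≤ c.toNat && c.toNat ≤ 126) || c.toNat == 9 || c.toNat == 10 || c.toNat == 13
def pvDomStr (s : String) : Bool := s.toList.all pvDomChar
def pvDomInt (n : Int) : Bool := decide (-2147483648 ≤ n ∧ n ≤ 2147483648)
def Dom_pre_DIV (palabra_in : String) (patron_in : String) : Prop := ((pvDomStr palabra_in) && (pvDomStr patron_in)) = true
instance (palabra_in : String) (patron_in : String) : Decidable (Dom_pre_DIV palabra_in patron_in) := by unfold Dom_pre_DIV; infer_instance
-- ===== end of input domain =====

-- B splits the pattern at the dots, refills each segment from a running offset into the word and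
-- rejoins with '.', replacing A's char-by-char pass with repeated string concatenation;
-- objective: faster (a timing run measured B faster at the largest size).

-- ===== PORT A =====
-- A walks the pattern; indice counts the non-dot characters consumed so far; palabra_in[indice]
-- raises IndexError when the word is too short (excluded by Pre_; pyGetD's default is never read there).
def pre_DIV (palabra_in : String) (patron_in : String) : String :=
  let st := patron_in.toList.foldl
    (fun (st : List Char × Int) car =>
      let indice := st.2 + 1
      if car ≠ '.' then
        (st.1 ++ [PySem.List.pyGetD palabra_in.toList indice ' '], indice)
      else
        (st.1 ++ ['.'], indice - 1))
    ([], -1)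
  String.ofList st.1

-- ===== PORT B =====
def pre_DIV_alt (palabra_in : String) (patron_in : String) : String :=
  let segs := PySem.Chars.splitOn patron_in.toList ['.']
  let st := segs.foldl
    (fun (st : List (List Char) × Int) seg =>
      (st.1 ++ [PySem.List.slice palabra_in.toList (some st.2) (some (st.2 + (seg.length : Int)))],
       st.2 + (seg.length : Int)))
    ([], 0)
  String.ofList (PySem.Chars.join ['.'] st.1)

-- ===== PRECONDITION & SPEC =====
-- A raises IndexError exactly when the pattern has more non-dot characters than the word has letters.
def Pre_pre_DIV (palabra_in : String) (patron_in : String) : Prop :=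
  patron_in.toList.countP (fun c => c ≠ '.') ≤ palabra_in.toList.length
instance (palabra_in : String) (patron_in : String) : Decidable (Pre_pre_DIV palabra_in patron_in) := by
  unfold Pre_pre_DIV; infer_instance
def pvWitness_pre_DIV : String × String := ("manzana", "man.za.na")

def Spec_pre_DIV (palabra_in : String) (patron_in : String) (out : String) : Prop :=
  out = pre_DIV_alt palabra_in patron_in
instance (palabra_in : String) (patron_in : String) (out : String) : Decidable (Spec_pre_DIV palabra_in patron_in out) := by
  unfold Spec_pre_DIV; infer_instance

-- ===== CLAIM (what is proved, stated in full; the proofs are below) =====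
def Claim_equal_pre_DIV : Prop := ∀ (palabra_in : String) (patron_in : String), Dom_pre_DIV palabra_in patron_in → Pre_pre_DIV palabra_in patron_in → Spec_pre_DIV palabra_in patron_in (pre_DIV palabra_in patron_in)
-- ===== LEMMAS AND PROOFS =====

-- reference: the divided word, reading the pattern char by char from word offset j
def pvRef (w : List Char) : List Char → Int → List Char
  | [], _ => []
  | c :: ps, j =>
    if c ≠ '.' then PySem.List.pyGetD w j ' ' :: pvRef w ps (j + 1)
    else '.' :: pvRef w ps j

-- structural version of splitOn · ['.']
def pvSplit : List Char → List (List Char)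
  | [] => [[]]
  | c :: cs =>
    if c = '.' then [] :: pvSplit cs
    else
      match pvSplit cs with
      | g :: gs => (c :: g) :: gs
      | [] => [[c]]

-- chunks taken from the word at a running offset, one per segment
def pvChunks (w : List Char) : List (List Char) → Int → List (List Char)
  | [], _ => []
  | s :: ss, pos =>
    PySem.List.slice w (some pos) (some (pos + (s.length : Int))) :: pvChunks w ss (pos + (s.length : Int))

theorem pvSplit_ne_nil (p : List Char) : pvSplit p ≠ [] := by
  cases p with
  | nil => simp [pvSplit]
  | cons c cs =>
    simp only [pvSplit]
    split
    · simp
    · cases h : pvSplit cs <;> simp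

theorem splitOn_go_eq (fuel : Nat) :
    ∀ (l cur : List Char) (acc : List (List Char)), l.length < fuel →
      PySem.Chars.splitOn.go ['.'] fuel l cur acc =
        acc.reverse ++
          (match pvSplit l with
           | g :: gs => (cur.reverse ++ g) :: gs
           | [] => []) := by
  induction fuel with
  | zero => intro l cur acc h; omega
  | succ fuel ih =>
    intro l cur acc h
    cases l with
    | nil =>
      rw [PySem.Chars.splitOn.go]
      all_goals simp [pvSplit]
    | cons c rest =>
      rw [PySem.Chars.splitOn.go]
      simp only [List.length_cons] at h
      by_cases hc : c = '.'
      · subst hc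
        have hp : (['.'] : List Char).isPrefixOf ('.' :: rest) = true := by
          simp [List.isPrefixOf]
        rw [if_pos hp]
        rw [ih _ _ _ (by simp; omega)]
        have hne := pvSplit_ne_nil rest
        cases hg : pvSplit rest with
        | nil => exact absurd hg hne
        | cons g gs => simp [pvSplit, hg]
      · have hp : (['.'] : List Char).isPrefixOf (c :: rest) = false := by
          simp [List.isPrefixOf]; exact fun h' => absurd h'.symm hc
        rw [if_neg (by simp [hp])]
        rw [ih _ _ _ (by omega)]
        have hne := pvSplit_ne_nil rest
        cases hg : pvSplit rest with
        | nil => exact absurd hg hne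
        | cons g gs => simp [pvSplit, hg, hc]

theorem splitOn_eq_pvSplit (p : List Char) :
    PySem.Chars.splitOn p ['.'] = pvSplit p := by
  show PySem.Chars.splitOn.go ['.'] (p.length + 1) p [] [] = _
  rw [splitOn_go_eq (p.length + 1) p [] [] (by omega)]
  have hne := pvSplit_ne_nil p
  cases hg : pvSplit p with
  | nil => exact absurd hg hne
  | cons g gs => simp

theorem foldB_eq_pvChunks (w : List Char) (segs : List (List Char)) :
    ∀ (acc : List (List Char)) (pos : Int),
      (segs.foldl
        (fun (st : List (List Char) × Int) seg =>
          (st.1 ++ [PySem.List.slice w (some st.2) (some (st.2 + (seg.length : Int)))],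
           st.2 + (seg.length : Int)))
        (acc, pos)).1 = acc ++ pvChunks w segs pos := by
  induction segs with
  | nil => intro acc pos; simp [pvChunks]
  | cons s ss ih =>
    intro acc pos
    simp only [List.foldl_cons, pvChunks]
    rw [ih]
    simp

theorem foldA_eq_pvRef (w : List Char) (p : List Char) :
    ∀ (acc : List Char) (j : Int),
      (p.foldl
        (fun (st : List Char × Int) car =>
          let indice := st.2 + 1
          if car ≠ '.' then (st.1 ++ [PySem.List.pyGetD w indice ' '], indice)
          else (st.1 ++ ['.'], indice - 1))
        (acc, j - 1)).1 = acc ++ pvRef w p j := by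
  induction p with
  | nil => intro acc j; simp [pvRef]
  | cons c ps ih =>
    intro acc j
    simp only [List.foldl_cons, pvRef]
    by_cases hc : c = '.'
    · subst hc
      simp only [ne_eq, not_true_eq_false, if_false]
      have : j - 1 + 1 - 1 = j - 1 := by ring
      rw [this, ih]
      simp
    · rw [if_pos (by simpa using hc), if_pos (by simpa using hc)]
      have : j - 1 + 1 = j := by ring
      rw [this]
      have : j = (j + 1) - 1 := by ring
      rw [this, ih]
      simp

theorem intercalate_cons_cons (sep : List Char) (x : Char) (a : List Char) (l : List (List Char)) :
    List.intercalate sep ((x :: a) :: l) = x :: List.intercalate sep (a :: l) := by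
  cases l <;> simp [List.intercalate, List.intersperse]

theorem intercalate_nil_cons (sep a : List Char) (l : List (List Char)) :
    List.intercalate sep ([] :: a :: l) = sep ++ List.intercalate sep (a :: l) := by
  simp [List.intercalate, List.intersperse]

theorem join_pvChunks_eq_pvRef (w : List Char) (p : List Char) :
    ∀ (pos : Nat), p.countP (fun c => c ≠ '.') + pos ≤ w.length →
      PySem.Chars.join ['.'] (pvChunks w (pvSplit p) (pos : Int)) = pvRef w p (pos : Int) := by
  induction p with
  | nil =>
    intro pos _
    simp [pvSplit, pvChunks, pvRef, PySem.List.slice_natCast, PySem.Chars.join,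
      List.intercalate]
  | cons c ps ih =>
    intro pos hlen
    have hne := pvSplit_ne_nil ps
    obtain ⟨g, gs, hg⟩ : ∃ g gs, pvSplit ps = g :: gs := by
      cases hps : pvSplit ps with
      | nil => exact absurd hps hne
      | cons g gs => exact ⟨g, gs, rfl⟩
    by_cases hc : c = '.'
    · subst hc
      have hcount : ('.' :: ps).countP (fun x => x ≠ '.') = ps.countP (fun x => x ≠ '.') := by
        simp
      rw [hcount] at hlen
      have ihe := ih pos hlen
      rw [hg] at ihe
      rw [show pvSplit ('.' :: ps) = [] :: g :: gs from by simp [pvSplit, hg]]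
      simp only [pvChunks, List.length_nil, Nat.cast_zero, add_zero]
      have hempty : PySem.List.slice w (some ((pos : Nat) : Int)) (some ((pos : Nat) : Int)) = [] := by
        rw [PySem.List.slice_natCast]; simp
      rw [hempty]
      simp only [pvChunks] at ihe
      simp only [PySem.Chars.join] at ihe ⊢
      rw [intercalate_nil_cons, ihe]
      simp [pvRef]
    · have hcount : (c :: ps).countP (fun x => x ≠ '.') = ps.countP (fun x => x ≠ '.') + 1 := by
        simp [hc]
      rw [hcount] at hlen
      have hpos : pos < w.length := by omega
      have ihe := ih (pos + 1) (by omega)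
      rw [hg] at ihe
      rw [show pvSplit (c :: ps) = (c :: g) :: gs from by simp [pvSplit, hc, hg]]
      simp only [pvChunks]
      have hdrop : w.drop pos = w[pos] :: w.drop (pos + 1) := List.drop_eq_getElem_cons hpos
      have hslice1 :
          PySem.List.slice w (some ((pos : Nat) : Int)) (some (((pos : Nat) : Int) + (((c :: g).length : Nat) : Int)))
            = w[pos] :: PySem.List.slice w (some (((pos + 1 : Nat)) : Int))
                (some ((((pos + 1 : Nat)) : Int) + ((g.length : Nat) : Int))) := by
        rw [PySem.List.slice_natCast_add, PySem.List.slice_natCast_add]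
        simp only [List.length_cons]
        rw [hdrop, List.take_succ_cons]
      rw [hslice1]
      rw [show (((pos : Nat) : Int) + (((c :: g).length : Nat) : Int))
            = ((((pos + 1 : Nat)) : Int) + ((g.length : Nat) : Int)) from by
              push_cast [List.length_cons]; ring]
      simp only [pvChunks] at ihe
      simp only [PySem.Chars.join] at ihe ⊢
      rw [intercalate_cons_cons, ihe]
      have hrhs : pvRef w (c :: ps) ((pos : Nat) : Int)
          = w[pos] :: pvRef w ps (((pos + 1 : Nat)) : Int) := by
        rw [pvRef, if_pos (by simpa using hc)]
        have h1 : PySem.List.pyGetD w ((pos : Nat) : Int) ' ' = w[pos] := by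
          rw [PySem.List.pyGetD_natCast]; simp [List.getD, hpos]
        rw [h1]
        norm_cast
      rw [hrhs]

-- countP over toList matches Pre_'s countP (definitional)
theorem pre_DIV_eq_ref (palabra_in patron_in : String) :
    pre_DIV palabra_in patron_in = String.ofList (pvRef palabra_in.toList patron_in.toList 0) := by
  unfold pre_DIV
  have := foldA_eq_pvRef palabra_in.toList patron_in.toList [] 0
  simp only [show (0:Int) - 1 = -1 by ring] at this
  simp only [this, List.nil_append]

theorem pre_DIV_alt_eq_ref (palabra_in patron_in : String)
    (h : Pre_pre_DIV palabra_in patron_in) :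
    pre_DIV_alt palabra_in patron_in = String.ofList (pvRef palabra_in.toList patron_in.toList 0) := by
  unfold pre_DIV_alt
  rw [splitOn_eq_pvSplit]
  have hfold := foldB_eq_pvChunks palabra_in.toList (pvSplit patron_in.toList) [] 0
  simp only [hfold, List.nil_append]
  unfold Pre_pre_DIV at h
  have hmain := join_pvChunks_eq_pvRef palabra_in.toList patron_in.toList 0 (by omega)
  simp only [Nat.cast_zero] at hmain
  rw [hmain]

-- ===== VERDICT (by name: the statement is the Claim_ definition above) =====
theorem pre_DIV_spec : Claim_equal_pre_DIV := by
  intro palabra_in patron_in _ hpre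
  unfold Spec_pre_DIV
  rw [pre_DIV_eq_ref, pre_DIV_alt_eq_ref _ _ hpre]
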